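-- pv_equiv track=rewrite | github.com/lexiconium/algorithms | programmers/172927.py | solution
-- ===== SOURCE A (Python) =====
-- MINERALS = ["diamond", "iron", "stone"]
--
-- MINERAL_SCORES = {"diamond": 31, "iron": 6, "stone": 1}
--
-- def pick_used(pick, mineral):
--     if pick == "diamond":
--         return 1
--     if pick == "iron":
--         return 5 if mineral == "diamond" else 1
--     if mineral == "diamond":
--         return 25
--     if mineral == "iron":
--         return 5
--     return 1
--
-- def solution(picks, minerals):
--     pick_seq = []
--
--     for i, mineral in enumerate(MINERALS):
--         pick_seq.extend([mineral for _ in range(picks[i])])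
--
--     pick_seq = sorted(pick_seq, key=lambda pick: MINERAL_SCORES[pick], reverse=True)
--     minerals = minerals[:min(len(pick_seq) * 5, len(minerals))]
--
--     mineral_subsets = sorted(
--         [minerals[i:min(i + 5, len(minerals))] for i in range(0, len(minerals), 5)],
--         key=lambda subset: sum(MINERAL_SCORES[mineral] for mineral in subset),
--         reverse=True
--     )
--
--     used = 0
--
--     for pick, mineral_subset in zip(pick_seq, mineral_subsets):
--         used += sum(pick_used(pick, mineral) for mineral in mineral_subset)
--
--     return used
-- ===== SOURCE B (Python) =====
-- SCORE = {"diamond": 31, "iron": 6, "stone": 1}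
--
-- def solution(picks, minerals):
--     # counting sort over chunk scores; cost computed from the score's unique
--     # (diamond, iron, stone) decomposition instead of per-mineral pick_used
--     d = max(picks[0], 0)
--     r = max(picks[1], 0)
--     s = max(picks[2], 0)
--     minerals = minerals[:5 * (d + r + s)]
--     counts = [0] * 156
--     for i in range(0, len(minerals), 5):
--         counts[sum(SCORE[m] for m in minerals[i:i + 5])] += 1
--     used = 0
--     idx = 0
--     for sc in range(155, -1, -1):
--         nd = sc // 31
--         ni = sc % 31 // 6
--         ns = sc % 31 % 6
--         for _ in range(counts[sc]):
--             if idx < d: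
--                 used += nd + ni + ns
--             elif idx < d + r:
--                 used += 5 * nd + ni + ns
--             else:
--                 used += 25 * nd + 5 * ni + ns
--             idx += 1
--     return used
-- ===== Notes on version B (the rewrite author's own statement) =====
-- stated objective: alternative
-- what changed: B never builds the pick-sequence list and replaces both stable comparison sorts by a counting sort: chunk scores are tallied into a 156-entry bucket array, iterated from highest score down, with each chunk's wear computed arithmetically from the score's unique (diamond, iron, stone) decomposition instead of summing pick_used per mineral.
import Mathlib
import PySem

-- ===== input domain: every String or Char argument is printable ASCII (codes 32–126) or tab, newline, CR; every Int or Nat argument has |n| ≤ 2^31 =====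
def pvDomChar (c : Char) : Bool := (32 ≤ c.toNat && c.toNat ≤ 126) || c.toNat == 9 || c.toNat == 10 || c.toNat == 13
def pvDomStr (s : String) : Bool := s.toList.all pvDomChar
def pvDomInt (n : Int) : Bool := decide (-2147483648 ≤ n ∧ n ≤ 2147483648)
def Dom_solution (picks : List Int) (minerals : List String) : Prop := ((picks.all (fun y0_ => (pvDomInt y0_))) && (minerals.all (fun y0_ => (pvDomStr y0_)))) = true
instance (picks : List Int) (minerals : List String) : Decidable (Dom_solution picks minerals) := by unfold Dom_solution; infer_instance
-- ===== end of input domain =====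

-- B replaces the two comparison sorts by a counting sort over the 156 possible
-- chunk scores and computes each chunk's wear from the score's unique
-- (diamond, iron, stone) decomposition, never materialising the pick sequence.

-- ===== PORT A =====
def pyMINERALS : List String := ["diamond", "iron", "stone"]

def pyMINERAL_SCORES : PySem.Dict String Int :=
  ((PySem.Dict.empty.insert "diamond" 31).insert "iron" 6).insert "stone" 1

def pick_used (pick mineral : String) : Int :=
  if pick == "diamond" then 1
  else if pick == "iron" then (if mineral == "diamond" then 5 else 1)
  else if mineral == "diamond" then 25
  else if mineral == "iron" then 5
  else 1

def solution (picks : List Int) (minerals : List String) : Int :=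
  let pick_seq : List String :=
    (PySem.List.enumerate pyMINERALS).foldl
      (fun acc im =>
        acc ++ (PySem.List.pyRange 0 (PySem.List.pyGetD picks im.1 0) 1).map (fun _ => im.2)) []
  let pick_seq := PySem.List.sorted pick_seq (fun pick => pyMINERAL_SCORES.getD pick 0) true
  let minerals := PySem.List.slice minerals none
      (some (min ((pick_seq.length : Int) * 5) ((minerals.length : Int))))
  let mineral_subsets :=
    PySem.List.sorted
      ((PySem.List.pyRange 0 (minerals.length : Int) 5).map (fun i =>
        PySem.List.slice minerals (some i) (some (min (i + 5) ((minerals.length : Int))))))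
      (fun subset => (subset.map (fun m => pyMINERAL_SCORES.getD m 0)).sum) true
  (pick_seq.zip mineral_subsets).foldl
    (fun used pm => used + (pm.2.map (fun m => pick_used pm.1 m)).sum) 0

-- ===== PORT B =====
def pySCORE : PySem.Dict String Int :=
  ((PySem.Dict.empty.insert "diamond" 31).insert "iron" 6).insert "stone" 1

def solution_alt (picks : List Int) (minerals : List String) : Int :=
  let d := max (PySem.List.pyGetD picks 0 0) 0
  let r := max (PySem.List.pyGetD picks 1 0) 0
  let s := max (PySem.List.pyGetD picks 2 0) 0
  let ms := PySem.List.slice minerals none (some (5 * (d + r + s)))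
  let counts : List Int :=
    (PySem.List.pyRange 0 (ms.length : Int) 5).foldl
      (fun counts i =>
        let sc := ((PySem.List.slice ms (some i) (some (i + 5))).map
                    (fun m => pySCORE.getD m 0)).sum
        PySem.List.pySetD counts sc (PySem.List.pyGetD counts sc 0 + 1))
      (PySem.List.pyRepeat [(0 : Int)] 156)
  let res :=
    (PySem.List.pyRange 155 (-1) (-1)).foldl
      (fun (ui : Int × Int) sc =>
        let nd := PySem.Int.floordiv sc 31
        let ni := PySem.Int.floordiv (PySem.Int.mod sc 31) 6
        let ns := PySem.Int.mod (PySem.Int.mod sc 31) 6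
        (PySem.List.pyRange 0 (PySem.List.pyGetD counts sc 0) 1).foldl
          (fun ui _ =>
            (ui.1 + (if ui.2 < d then nd + ni + ns
                     else if ui.2 < d + r then 5 * nd + ni + ns
                     else 25 * nd + 5 * ni + ns), ui.2 + 1))
          ui)
      ((0 : Int), (0 : Int))
  res.1

-- ===== PRECONDITION & SPEC =====
-- Pre_ admits exactly the inputs where A returns: picks must have at least three
-- entries (A indexes picks[0..2], IndexError otherwise) and every mineral A
-- actually scores (the first 5*(number of picks) ones) must be one of the three
-- known minerals (KeyError otherwise).
def Pre_solution (picks : List Int) (minerals : List String) : Prop :=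
  3 ≤ picks.length ∧
  ∀ m ∈ minerals.take (5 * ((max (picks.getD 0 0) 0).toNat + (max (picks.getD 1 0) 0).toNat
          + (max (picks.getD 2 0) 0).toNat)),
    m = "diamond" ∨ m = "iron" ∨ m = "stone"
instance (picks : List Int) (minerals : List String) : Decidable (Pre_solution picks minerals) := by
  unfold Pre_solution; infer_instance

def pvWitness_solution : List Int × List String :=
  ([2, 1, 0], ["diamond", "stone", "stone", "stone", "stone", "iron"])

def Spec_solution (picks : List Int) (minerals : List String) (out : Int) : Prop := out = solution_alt picks minerals
instance (picks : List Int) (minerals : List String) (out : Int) : Decidable (Spec_solution picks minerals out) := by unfold Spec_solution; infer_instance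

-- ===== CLAIM (what is proved, stated in full; the proofs are below) =====
def Claim_equal_solution : Prop := ∀ (picks : List Int) (minerals : List String), Dom_solution picks minerals → Pre_solution picks minerals → Spec_solution picks minerals (solution picks minerals)

-- ===== LEMMAS AND PROOFS =====

def pvValid (ch : List String) : Prop :=
  ∀ m ∈ ch, m = "diamond" ∨ m = "iron" ∨ m = "stone"

theorem pv_sum_counts (f : String → Int) :
    ∀ (ch : List String), pvValid ch →
      (ch.map f).sum = f "diamond" * (ch.count "diamond" : Int)
        + f "iron" * (ch.count "iron" : Int) + f "stone" * (ch.count "stone" : Int) := by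
  intro ch
  induction ch with
  | nil => intro _; simp
  | cons m t ih =>
    intro hv
    have hm := hv m (by simp)
    have ht : pvValid t := fun x hx => hv x (by simp [hx])
    have := ih ht
    rcases hm with h | h | h <;> subst h <;>
      simp [this] <;> ring_nf

def pvG (d r : Int) (k : Nat) (v : Int) : Int :=
  if (k : Int) < d then
    PySem.Int.floordiv v 31 + PySem.Int.floordiv (PySem.Int.mod v 31) 6
      + PySem.Int.mod (PySem.Int.mod v 31) 6
  else if (k : Int) < d + r then
    5 * PySem.Int.floordiv v 31 + PySem.Int.floordiv (PySem.Int.mod v 31) 6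
      + PySem.Int.mod (PySem.Int.mod v 31) 6
  else
    25 * PySem.Int.floordiv v 31 + 5 * PySem.Int.floordiv (PySem.Int.mod v 31) 6
      + PySem.Int.mod (PySem.Int.mod v 31) 6

def pvSumG (d r : Int) : Nat → List Int → Int
  | _, [] => 0
  | k, v :: t => pvG d r k v + pvSumG d r (k + 1) t

theorem pv_sumG_append (d r : Int) (xs ys : List Int) (k : Nat) :
    pvSumG d r k (xs ++ ys) = pvSumG d r k xs + pvSumG d r (k + xs.length) ys := by
  induction xs generalizing k with
  | nil => simp [pvSumG]
  | cons v t ih =>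
    simp [pvSumG, ih (k + 1)]
    have : k + 1 + t.length = k + (t.length + 1) := by omega
    rw [this]; ring

theorem pv_map_const_pyRange {α : Type} (k : Int) (x : α) :
    (PySem.List.pyRange 0 k 1).map (fun _ => x) = List.replicate k.toNat x := by
  rw [PySem.List.pyRange_one]
  rw [List.map_map]
  have : ((fun _ => x) ∘ fun j : Nat => (0 : Int) + j) = fun _ => x := rfl
  rw [this]
  simp

def pvScoreN (ch : List String) : Nat :=
  31 * ch.count "diamond" + 6 * ch.count "iron" + ch.count "stone"

def pvPickAt (a b : Nat) (k : Nat) : String :=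
  if k < a then "diamond" else if k < a + b then "iron" else "stone"

theorem pv_len_counts (ch : List String) (hv : pvValid ch) :
    ch.count "diamond" + ch.count "iron" + ch.count "stone" = ch.length := by
  have h := pv_sum_counts (fun _ => (1 : Int)) ch hv
  rw [PySem.List.sum_map_const_int] at h
  have : ((ch.count "diamond" + ch.count "iron" + ch.count "stone" : Nat) : Int)
      = (ch.length : Int) := by push_cast; linarith
  exact_mod_cast this

theorem pv_costEq (a b : Nat) (k : Nat) (ch : List String) (hv : pvValid ch)
    (hl : ch.length ≤ 5) :
    (ch.map (fun m => pick_used (pvPickAt a b k) m)).sum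
      = pvG (a : Int) (b : Int) k ((pvScoreN ch : Nat) : Int) := by
  have hlen := pv_len_counts ch hv
  set cd := ch.count "diamond" with hcd
  set ci := ch.count "iron" with hci
  set cs := ch.count "stone" with hcs
  have hle : cd + ci + cs ≤ 5 := by omega
  have h31 : (31 : Int) = ((31 : Nat) : Int) := by norm_num
  have h6 : (6 : Int) = ((6 : Nat) : Int) := by norm_num
  have hfd : PySem.Int.floordiv ((pvScoreN ch : Nat) : Int) 31 = ((pvScoreN ch / 31 : Nat) : Int) := by
    rw [h31, PySem.Int.floordiv_natCast]
  have hmd : PySem.Int.mod ((pvScoreN ch : Nat) : Int) 31 = ((pvScoreN ch % 31 : Nat) : Int) := by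
    rw [h31, PySem.Int.mod_natCast]
  have hfi : PySem.Int.floordiv ((pvScoreN ch % 31 : Nat) : Int) 6 = ((pvScoreN ch % 31 / 6 : Nat) : Int) := by
    rw [h6, PySem.Int.floordiv_natCast]
  have hmi : PySem.Int.mod ((pvScoreN ch % 31 : Nat) : Int) 6 = ((pvScoreN ch % 31 % 6 : Nat) : Int) := by
    rw [h6, PySem.Int.mod_natCast]
  have hS : pvScoreN ch = 31 * cd + 6 * ci + cs := rfl
  have hdec1 : pvScoreN ch / 31 = cd := by omega
  have hdec2 : pvScoreN ch % 31 / 6 = ci := by omega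
  have hdec3 : pvScoreN ch % 31 % 6 = cs := by omega
  unfold pvG pvPickAt
  rw [hfd, hmd, hfi, hmi, hdec1, hdec2, hdec3]
  have hka : k < a ↔ (k : Int) < (a : Int) := by exact_mod_cast Iff.rfl
  have hkab : k < a + b ↔ (k : Int) < (a : Int) + (b : Int) := by
    constructor <;> intro h
    · exact_mod_cast h
    · exact_mod_cast h
  by_cases h1 : k < a
  · simp only [if_pos h1, if_pos (hka.mp h1)]
    have := pv_sum_counts (fun m => pick_used "diamond" m) ch hv
    simp only [this]
    norm_num [pick_used]
    omega
  · by_cases h2 : k < a + b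
    · simp only [if_neg h1, if_pos h2, if_neg (fun hc => h1 (hka.mpr hc)), if_pos (hkab.mp h2)]
      have := pv_sum_counts (fun m => pick_used "iron" m) ch hv
      simp only [this]
      norm_num [pick_used]
      push_cast
      omega
    · simp only [if_neg h1, if_neg h2, if_neg (fun hc => h1 (hka.mpr hc)),
        if_neg (fun hc => h2 (hkab.mpr hc))]
      have := pv_sum_counts (fun m => pick_used "stone" m) ch hv
      simp only [this]
      norm_num [pick_used]
      push_cast
      omega

def pvP (a b c : Nat) : List String :=
  List.replicate a "diamond" ++ List.replicate b "iron" ++ List.replicate c "stone"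

theorem pvP_get (a b c k : Nat) (hk : k < a + b + c) :
    (pvP a b c)[k]'(by simp [pvP]; omega) = pvPickAt a b k := by
  unfold pvP pvPickAt
  by_cases h2 : k < a + b
  · rw [List.getElem_append_left (by simpa using h2)]
    by_cases h1 : k < a
    · rw [List.getElem_append_left (by simpa using h1)]
      simp [h1]
    · rw [List.getElem_append_right (by simpa using h1)]
      simp [h1, h2]
  · rw [List.getElem_append_right (by simpa using h2)]
    have h1 : ¬ k < a := fun h => h2 (Nat.lt_of_lt_of_le h (Nat.le_add_right a b))
    simp [h1, h2]

theorem pv_zipSum (a b c : Nat) :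
    ∀ (chs : List (List String)) (k : Nat),
      (∀ ch ∈ chs, pvValid ch ∧ ch.length ≤ 5) → k + chs.length ≤ a + b + c →
      ((((pvP a b c).drop k).zip chs).map
          (fun pm => (pm.2.map (fun m => pick_used pm.1 m)).sum)).sum
        = pvSumG (a : Int) (b : Int) k (chs.map (fun ch => ((pvScoreN ch : Nat) : Int))) := by
  intro chs
  induction chs with
  | nil => intro k _ _; simp [pvSumG]
  | cons ch t ih =>
    intro k hall hk
    have hklt : k < a + b + c := by simp at hk; omega
    have hkP : k < (pvP a b c).length := by simp [pvP]; omega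
    rw [List.drop_eq_getElem_cons hkP, pvP_get a b c k hklt]
    simp only [List.zip_cons_cons, List.map_cons, List.sum_cons, pvSumG]
    have h1 := (hall ch (by simp))
    rw [pv_costEq a b k ch h1.1 h1.2,
      ih (k + 1) (fun x hx => hall x (by simp [hx])) (by simp at hk ⊢; omega)]

theorem pv_count_build :
    ∀ (vs : List Int) (cnt : List Int),
      (∀ v ∈ vs, 0 ≤ v ∧ v < (cnt.length : Int)) →
      ∀ (w : Int), 0 ≤ w →
        PySem.List.pyGetD
          (vs.foldl (fun cnt v => PySem.List.pySetD cnt v (PySem.List.pyGetD cnt v 0 + 1)) cnt)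
          w 0
        = PySem.List.pyGetD cnt w 0 + (vs.count w : Int) := by
  intro vs
  induction vs with
  | nil => intro cnt _ w _; simp
  | cons v t ih =>
    intro cnt hall w hw
    have hv := hall v (by simp)
    have hlen : (PySem.List.pySetD cnt v (PySem.List.pyGetD cnt v 0 + 1)).length = cnt.length :=
      PySem.List.length_pySetD cnt v _
    simp only [List.foldl_cons]
    rw [ih _ (fun x hx => by rw [hlen]; exact hall x (by simp [hx])) w hw]
    have hvc : v = ((v.toNat : Nat) : Int) := (Int.toNat_of_nonneg hv.1).symm
    have hwc : w = ((w.toNat : Nat) : Int) := (Int.toNat_of_nonneg hw).symm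
    have hvlt : v.toNat < cnt.length := by omega
    rw [hvc, hwc, PySem.List.pyGetD_pySetD_natCast cnt v.toNat w.toNat _ 0 hvlt]
    rw [← hvc, ← hwc]
    by_cases hweq : w.toNat = v.toNat
    · have hvw : v = w := by omega
      subst hvw
      rw [if_pos hweq]
      simp
      omega
    · have hne : v ≠ w := by omega
      rw [if_neg hweq]
      simp [hne]

theorem pv_flatMap_rep_perm :
    ∀ (ks : List Int) (vs : List Int), ks.Nodup → (∀ v ∈ vs, v ∈ ks) →
      (ks.flatMap (fun k => List.replicate (vs.count k) k)).Perm vs := by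
  intro ks
  induction ks with
  | nil =>
    intro vs _ hall
    have : vs = [] := List.eq_nil_iff_forall_not_mem.mpr (fun x hx => by simpa using hall x hx)
    simp [this]
  | cons k t ih =>
    intro vs hnd hall
    rw [List.flatMap_cons]
    have hrest : t.flatMap (fun k' => List.replicate (vs.count k') k')
        = t.flatMap (fun k' => List.replicate ((vs.filter (fun x => !(x == k))).count k') k') := by
      apply List.flatMap_congr
      intro x hx
      have hxk : x ≠ k := fun hc => (List.nodup_cons.mp hnd).1 (hc ▸ hx)
      rw [List.count_filter (by simp [hxk])]
    rw [hrest]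
    have hperm := ih (vs.filter (fun x => !(x == k))) (List.nodup_cons.mp hnd).2
      (fun v hv => by
        have hmem := List.mem_of_mem_filter hv
        have hne : ¬ (v == k) := by
          have := List.of_mem_filter hv
          simpa using this
        have := hall v hmem
        simp at this
        rcases this with h | h
        · exact absurd (by simp [h]) hne
        · exact h)
    refine List.Perm.trans (List.Perm.append_left _ hperm) ?_
    rw [← List.filter_beq k]
    exact List.filter_append_perm _ vs

def pvChunks (ms : List String) : List (List String) :=
  (List.range ((ms.length + 4) / 5)).map (fun j => (ms.drop (5 * j)).take 5)

theorem pv_pyRange5 (L : Nat) :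
    PySem.List.pyRange 0 (L : Int) 5
      = (List.range ((L + 4) / 5)).map (fun j => ((5 * j : Nat) : Int)) := by
  rw [PySem.List.pyRange_of_pos 0 (L : Int) (by norm_num)]
  have hcnt : (if (0 : Int) < (L : Int) then (((L : Int) - 0 + 5 - 1) / 5).toNat else 0)
      = (L + 4) / 5 := by
    split <;> omega
  rw [hcnt]
  apply List.map_congr_left
  intro j _
  push_cast
  ring

theorem pv_take_min (ms : List String) (j : Nat) (hj : 5 * j < ms.length) :
    (ms.drop (5 * j)).take (min (5 * j + 5) ms.length - 5 * j) = (ms.drop (5 * j)).take 5 := by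
  rw [List.take_eq_take_min, List.take_eq_take_min (i := 5)]
  congr 1
  rw [List.length_drop]
  omega

theorem pv_chunksA (ms : List String) :
    (PySem.List.pyRange 0 (ms.length : Int) 5).map (fun i =>
        PySem.List.slice ms (some i) (some (min (i + 5) (ms.length : Int))))
      = pvChunks ms := by
  rw [pv_pyRange5, List.map_map]
  unfold pvChunks
  apply List.map_congr_left
  intro j hj
  simp only [Function.comp_apply]
  have hj5 : 5 * j < ms.length := by
    have := List.mem_range.mp hj
    omega
  have hmin : min (((5 * j : Nat) : Int) + 5) (ms.length : Int)
      = ((min (5 * j + 5) ms.length : Nat) : Int) := by push_cast; omega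
  rw [hmin, PySem.List.slice_natCast]
  exact pv_take_min ms j hj5

theorem pv_sliceB (ms : List String) (j : Nat) :
    PySem.List.slice ms (some ((5 * j : Nat) : Int)) (some (((5 * j : Nat) : Int) + 5))
      = (ms.drop (5 * j)).take 5 := by
  have h : (((5 * j : Nat) : Int) + 5) = ((5 * j + 5 : Nat) : Int) := by push_cast; ring
  rw [h, PySem.List.slice_natCast]
  congr 1
  omega

theorem pv_innerLoop (d r : Int) (sc u : Int) (idx : Nat) (l : List Int) :
    l.foldl (fun (ui : Int × Int) _ =>
        (ui.1 + (if ui.2 < d then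
            PySem.Int.floordiv sc 31 + PySem.Int.floordiv (PySem.Int.mod sc 31) 6
              + PySem.Int.mod (PySem.Int.mod sc 31) 6
          else if ui.2 < d + r then
            5 * PySem.Int.floordiv sc 31 + PySem.Int.floordiv (PySem.Int.mod sc 31) 6
              + PySem.Int.mod (PySem.Int.mod sc 31) 6
          else
            25 * PySem.Int.floordiv sc 31 + 5 * PySem.Int.floordiv (PySem.Int.mod sc 31) 6
              + PySem.Int.mod (PySem.Int.mod sc 31) 6), ui.2 + 1)) (u, (idx : Int))
      = (u + pvSumG d r idx (List.replicate l.length sc), ((idx + l.length : Nat) : Int)) := by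
  induction l generalizing u idx with
  | nil => simp [pvSumG]
  | cons x t ih =>
    rw [List.foldl_cons]
    have hcast : ((idx : Int) + 1) = ((idx + 1 : Nat) : Int) := by push_cast; ring
    simp only []
    rw [hcast, ih]
    simp only [Prod.mk.injEq]
    constructor
    · show u + pvG d r idx sc + pvSumG d r (idx + 1) (List.replicate t.length sc)
        = u + pvSumG d r idx (List.replicate (x :: t).length sc)
      rw [List.length_cons, List.replicate_succ, pvSumG, add_assoc]
    · show ((idx + 1 + t.length : Nat) : Int) = ((idx + (x :: t).length : Nat) : Int)
      rw [List.length_cons]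
      push_cast
      ring

theorem pv_outerLoop (d r : Int) (cnt : List Int) :
    ∀ (ks : List Int) (u : Int) (idx : Nat),
    ks.foldl (fun (ui : Int × Int) sc =>
        (PySem.List.pyRange 0 (PySem.List.pyGetD cnt sc 0) 1).foldl
          (fun ui _ =>
            (ui.1 + (if ui.2 < d then
                PySem.Int.floordiv sc 31 + PySem.Int.floordiv (PySem.Int.mod sc 31) 6
                  + PySem.Int.mod (PySem.Int.mod sc 31) 6
              else if ui.2 < d + r then
                5 * PySem.Int.floordiv sc 31 + PySem.Int.floordiv (PySem.Int.mod sc 31) 6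
                  + PySem.Int.mod (PySem.Int.mod sc 31) 6
              else
                25 * PySem.Int.floordiv sc 31 + 5 * PySem.Int.floordiv (PySem.Int.mod sc 31) 6
                  + PySem.Int.mod (PySem.Int.mod sc 31) 6), ui.2 + 1)) ui) (u, (idx : Int))
      = (u + pvSumG d r idx (ks.flatMap (fun sc => List.replicate (PySem.List.pyGetD cnt sc 0).toNat sc)),
         ((idx + (ks.map (fun sc => (PySem.List.pyGetD cnt sc 0).toNat)).sum : Nat) : Int)) := by
  intro ks
  induction ks with
  | nil => intro u idx; simp [pvSumG]
  | cons sc t ih =>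
    intro u idx
    rw [List.foldl_cons]
    have hlen : (PySem.List.pyRange 0 (PySem.List.pyGetD cnt sc 0) 1).length
        = (PySem.List.pyGetD cnt sc 0).toNat := by
      rw [PySem.List.length_pyRange_one]
      omega
    rw [show ((u, (idx : Int)) : Int × Int) = ((u, (idx : Int)) : Int × Int) from rfl]
    rw [pv_innerLoop d r sc u idx _, hlen, ih]
    rw [List.flatMap_cons, pv_sumG_append]
    rw [List.length_replicate]
    simp only [Prod.mk.injEq]
    constructor
    · rw [add_assoc]
    · rw [List.map_cons, List.sum_cons]
      congr 1
      omega

theorem pv_dict_sum (ch : List String) (hv : pvValid ch) :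
    (ch.map (fun m => pyMINERAL_SCORES.getD m 0)).sum = ((pvScoreN ch : Nat) : Int) := by
  rw [pv_sum_counts _ ch hv]
  have h1 : pyMINERAL_SCORES.getD "diamond" 0 = 31 := by decide
  have h2 : pyMINERAL_SCORES.getD "iron" 0 = 6 := by decide
  have h3 : pyMINERAL_SCORES.getD "stone" 0 = 1 := by decide
  rw [h1, h2, h3]
  unfold pvScoreN
  push_cast
  ring

theorem pv_score_bound (ch : List String) (hv : pvValid ch) (hl : ch.length ≤ 5) :
    pvScoreN ch ≤ 155 := by
  have := pv_len_counts ch hv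
  unfold pvScoreN
  omega

theorem pv_chunks_all (ms : List String) (hms : pvValid ms) :
    ∀ ch ∈ pvChunks ms, pvValid ch ∧ ch.length ≤ 5 := by
  intro ch hch
  unfold pvChunks at hch
  obtain ⟨j, _, rfl⟩ := List.mem_map.mp hch
  constructor
  · intro m hm
    exact hms m (List.mem_of_mem_drop (List.mem_of_mem_take hm))
  · exact List.length_take_le 5 _

def pvKS : List Int := (List.range 156).map (fun t : Nat => 155 - (t : Int))

theorem pvKS_nodup : pvKS.Nodup := by
  unfold pvKS
  refine List.Nodup.map ?_ List.nodup_range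
  intro x y h
  simp only at h
  omega

theorem pvKS_pairwise : List.Pairwise (fun x y : Int => y ≤ x) pvKS := by
  unfold pvKS
  rw [List.pairwise_map]
  refine List.Pairwise.imp ?_ List.pairwise_lt_range
  intro a b h
  omega

theorem mem_pvKS (v : Int) : v ∈ pvKS ↔ 0 ≤ v ∧ v ≤ 155 := by
  unfold pvKS
  constructor
  · intro h
    obtain ⟨t, ht, rfl⟩ := List.mem_map.mp h
    have := List.mem_range.mp ht
    omega
  · intro hv
    exact List.mem_map.mpr ⟨(155 - v).toNat, List.mem_range.mpr (by omega), by omega⟩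

theorem pv_flatMap_rep_pairwise (f : Int → Nat) :
    List.Pairwise (fun x y : Int => y ≤ x) (pvKS.flatMap (fun k => List.replicate (f k) k)) := by
  rw [List.pairwise_flatMap]
  constructor
  · intro a _
    rw [List.pairwise_replicate]
    right
    exact le_refl a
  · apply pvKS_pairwise.imp
    intro a b hab x hx y hy
    rw [List.eq_of_mem_replicate hx, List.eq_of_mem_replicate hy]
    exact hab

theorem pv_lists_eq (vs : List Int) (hvs : ∀ v ∈ vs, 0 ≤ v ∧ v ≤ 155)
    (Sm : List Int) (hperm : Sm.Perm vs) (hpw : List.Pairwise (fun x y : Int => y ≤ x) Sm) :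
    Sm = pvKS.flatMap (fun k => List.replicate (vs.count k) k) := by
  apply List.Perm.eq_of_pairwise (le := fun x y : Int => y ≤ x)
  · intro a b _ _ h1 h2
    omega
  · exact hpw
  · exact pv_flatMap_rep_pairwise _
  · exact hperm.trans (pv_flatMap_rep_perm pvKS vs pvKS_nodup
      (fun v hv => (mem_pvKS v).mpr (hvs v hv))).symm

theorem pv_sort_P (a b c : Nat) :
    PySem.List.sorted (pvP a b c) (fun pick => pyMINERAL_SCORES.getD pick 0) true = pvP a b c := by
  apply PySem.List.sorted_rev_eq_self_of_pairwise
  unfold pvP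
  have hd : pyMINERAL_SCORES.getD "diamond" 0 = 31 := by decide
  have hi : pyMINERAL_SCORES.getD "iron" 0 = 6 := by decide
  have hs : pyMINERAL_SCORES.getD "stone" 0 = 1 := by decide
  have pr : ∀ (n : Nat) (x : String),
      List.Pairwise (fun p q => pyMINERAL_SCORES.getD q 0 ≤ pyMINERAL_SCORES.getD p 0)
        (List.replicate n x) :=
    fun n x => List.pairwise_replicate.mpr (Or.inr le_rfl)
  rw [List.pairwise_append]
  refine ⟨?_, pr _ _, ?_⟩
  · rw [List.pairwise_append]
    refine ⟨pr _ _, pr _ _, ?_⟩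
    intro x hx y hy
    rw [List.eq_of_mem_replicate hx, List.eq_of_mem_replicate hy, hd, hi]
    norm_num
  · intro x hx y hy
    rw [List.eq_of_mem_replicate hy, hs]
    rcases List.mem_append.mp hx with h | h
    · rw [List.eq_of_mem_replicate h, hd]; norm_num
    · rw [List.eq_of_mem_replicate h, hi]; norm_num

-- ===== VERDICT (by name: the statement is the Claim_ definition above) =====
theorem pv_range_desc : PySem.List.pyRange 155 (-1) (-1) = pvKS := by
  rw [PySem.List.pyRange_neg_one]
  unfold pvKS
  norm_num
  rfl

theorem solution_spec : Claim_equal_solution := by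
  intro picks minerals _ hpre
  obtain ⟨h3, hval⟩ := hpre
  unfold Spec_solution solution solution_alt
  have henum : PySem.List.enumerate pyMINERALS
      = [((0 : Int), "diamond"), (1, "iron"), (2, "stone")] := by decide
  have e0 : PySem.List.pyGetD picks (0 : Int) 0 = picks.getD 0 0 :=
    PySem.List.pyGetD_zero picks 0
  have e1 : PySem.List.pyGetD picks (1 : Int) 0 = picks.getD 1 0 :=
    PySem.List.pyGetD_ofNat' picks 1 0
  have e2 : PySem.List.pyGetD picks (2 : Int) 0 = picks.getD 2 0 :=
    PySem.List.pyGetD_ofNat' picks 2 0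
  set a := (picks.getD 0 0).toNat with ha
  set b := (picks.getD 1 0).toNat with hb
  set c := (picks.getD 2 0).toNat with hc
  simp only [henum, List.foldl_cons, List.foldl_nil, List.nil_append, e0, e1, e2,
    pv_map_const_pyRange]
  rw [show (List.replicate (picks.getD 0 0).toNat "diamond"
      ++ List.replicate (picks.getD 1 0).toNat "iron"
      ++ List.replicate (picks.getD 2 0).toNat "stone") = pvP a b c from rfl,
    pv_sort_P a b c]
  have hlenP : (pvP a b c).length = a + b + c := by simp [pvP]; omega
  rw [hlenP]
  have hmin1 : min (((a + b + c : Nat) : Int) * 5) ((minerals.length : Int))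
      = ((min (5 * (a + b + c)) minerals.length : Nat) : Int) := by push_cast; omega
  rw [hmin1, PySem.List.slice_to _ (by omega)]
  rw [Int.toNat_natCast, ← List.take_eq_take_min]
  set ms := minerals.take (5 * (a + b + c)) with hmsdef
  rw [pv_chunksA ms]
  -- shared facts
  have hvalms : pvValid ms := by
    intro m hm
    apply hval m
    have h5 : 5 * ((max (picks.getD 0 0) 0).toNat + (max (picks.getD 1 0) 0).toNat
        + (max (picks.getD 2 0) 0).toNat) = 5 * (a + b + c) := by omega
    rw [h5]
    exact hm
  have hchall := pv_chunks_all ms hvalms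
  have hmslen : ms.length ≤ 5 * (a + b + c) := by
    rw [hmsdef, List.length_take]
    omega
  -- A side: foldl over zip → pvSumG
  rw [PySem.List.foldl_add, zero_add]
  rw [show pvP a b c = (pvP a b c).drop 0 from (List.drop_zero).symm]
  rw [pv_zipSum a b c _ 0
    (fun ch hch => hchall ch ((PySem.List.mem_sorted _ _ _ ch).mp hch))
    (by
      rw [PySem.List.length_sorted]
      have : (pvChunks ms).length = (ms.length + 4) / 5 := by simp [pvChunks]
      omega)]
  -- B side: picks maxima are the casts of a b c
  have hda : max (picks.getD 0 0) 0 = ((a : Nat) : Int) := by omega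
  have hdb : max (picks.getD 1 0) 0 = ((b : Nat) : Int) := by omega
  have hdc : max (picks.getD 2 0) 0 = ((c : Nat) : Int) := by omega
  rw [hda, hdb, hdc]
  have hmin2 : (5 : Int) * (((a : Nat) : Int) + ((b : Nat) : Int) + ((c : Nat) : Int))
      = ((5 * (a + b + c) : Nat) : Int) := by push_cast; ring
  rw [hmin2, PySem.List.slice_to _ (by omega), Int.toNat_natCast, ← hmsdef]
  -- B side: the counts loop is a fold of the counting step over the chunk scores
  have hSS : pySCORE = pyMINERAL_SCORES := rfl
  rw [hSS, pv_pyRange5 ms.length, List.foldl_map]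
  rw [PySem.List.foldl_congr_mem' (List.range ((ms.length + 4) / 5)) _
    (fun cnt (j : Nat) => PySem.List.pySetD cnt ((pvScoreN ((ms.drop (5 * j)).take 5) : Nat) : Int)
      (PySem.List.pyGetD cnt ((pvScoreN ((ms.drop (5 * j)).take 5) : Nat) : Int) 0 + 1)) _
    (by
      intro j hj cnt
      have hmem : (ms.drop (5 * j)).take 5 ∈ pvChunks ms := by
        unfold pvChunks
        exact List.mem_map.mpr ⟨j, hj, rfl⟩
      rw [pv_sliceB ms j, pv_dict_sum _ (hchall _ hmem).1])]
  rw [← List.foldl_map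
    (f := fun j : Nat => ((pvScoreN ((ms.drop (5 * j)).take 5) : Nat) : Int))
    (g := fun cnt v => PySem.List.pySetD cnt v (PySem.List.pyGetD cnt v 0 + 1))]
  have hvs : (List.range ((ms.length + 4) / 5)).map
      (fun j : Nat => ((pvScoreN ((ms.drop (5 * j)).take 5) : Nat) : Int))
      = (pvChunks ms).map (fun ch => ((pvScoreN ch : Nat) : Int)) := by
    unfold pvChunks
    rw [List.map_map]
    rfl
  rw [hvs]
  set vs := (pvChunks ms).map (fun ch => ((pvScoreN ch : Nat) : Int)) with hvsdef
  rw [show PySem.List.pyRepeat [(0 : Int)] 156 = List.replicate 156 (0 : Int) from by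
    rw [PySem.List.pyRepeat_singleton]
    rfl]
  rw [pv_range_desc]
  rw [show ((0 : Int), (0 : Int)) = ((0 : Int), ((0 : Nat) : Int)) from rfl]
  rw [pv_outerLoop]
  simp only [zero_add]
  -- score facts
  have hvsb : ∀ v ∈ vs, 0 ≤ v ∧ v ≤ 155 := by
    intro v hv
    rw [hvsdef] at hv
    obtain ⟨ch, hch, rfl⟩ := List.mem_map.mp hv
    have := pv_score_bound ch (hchall ch hch).1 (hchall ch hch).2
    omega
  have hcount : ∀ sc ∈ pvKS,
      PySem.List.pyGetD
        (vs.foldl (fun cnt v => PySem.List.pySetD cnt v (PySem.List.pyGetD cnt v 0 + 1))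
          (List.replicate 156 (0 : Int))) sc 0
      = ((vs.count sc : Nat) : Int) := by
    intro sc hsc
    obtain ⟨h0, h155⟩ := (mem_pvKS sc).mp hsc
    rw [pv_count_build vs (List.replicate 156 (0 : Int))
      (fun v hv => ⟨(hvsb v hv).1, by rw [List.length_replicate]; have := (hvsb v hv).2; omega⟩)
      sc h0]
    rw [PySem.List.pyGetD_eq_getElem _ 0 h0 (by rw [List.length_replicate]; omega)]
    rw [List.getElem_replicate, zero_add]
  rw [List.flatMap_congr (fun sc hsc => by rw [hcount sc hsc, Int.toNat_natCast])]
  congr 1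
  exact pv_lists_eq vs hvsb _
    ((PySem.List.sorted_perm (pvChunks ms) _ true).map _)
    (List.pairwise_map.mpr
      ((PySem.List.sorted_pairwise_rev (pvChunks ms)
          (fun subset => (subset.map (fun pick => pyMINERAL_SCORES.getD pick 0)).sum)).imp_of_mem
        (fun hx hy hle => by
          have hvx := (hchall _ ((PySem.List.mem_sorted _ _ _ _).mp hx)).1
          have hvy := (hchall _ ((PySem.List.mem_sorted _ _ _ _).mp hy)).1
          have ex := pv_dict_sum _ hvx
          have ey := pv_dict_sum _ hvy
          rw [ex, ey] at hle
          exact_mod_cast hle)))
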